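-- pv_equiv track=rewrite | github.com/ben165/aoc25 | 02/b.py | isInvalid2
-- ===== SOURCE A (Python) =====
-- def isInvalid2(nr):
--   nr_str = str(nr)
--   len_str = len(nr_str)
--
--   #1
--   if (len_str > 1):
--     b = nr_str[0]
--     c = 1
--     for i in range(1, len_str):
--       if (b == nr_str[i]):
--         c += 1
--         continue
--     if (c == len_str):
--       return True
--
--   #2
--   if (len_str >= 4 and len_str%2==0):
--     parts = len_str//2
--     l = []
--     step = 2
--     start = 0
--     ende = start + step
--     for i in range(0, parts):
--       l.append(nr_str[start:ende])
--       start += step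
--       ende += step
--
--     b = l[0]
--     c = 1
--     for i in range(1, len(l)):
--       if (b == l[i]):
--         c += 1
--         continue
--     if (c == len(l)):
--       return True
--
--   #3
--   if (len_str >= 6 and len_str%3==0):
--     parts = len_str//3
--     l = []
--     step = 3
--     start = 0
--     ende = start + step
--     for i in range(0, parts):
--       l.append(nr_str[start:ende])
--       start += step
--       ende += step
--
--     b = l[0]
--     c = 1
--     for i in range(1, len(l)):
--       if (b == l[i]):
--         c += 1
--         continue
--     if (c == len(l)):
--       return True
--
--   #4
--   if (len_str >= 8 and len_str%4==0):
--     parts = len_str//4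
--     l = []
--     step = 4
--     start = 0
--     ende = start + step
--     for i in range(0, parts):
--       l.append(nr_str[start:ende])
--       start += step
--       ende += step
--
--     b = l[0]
--     c = 1
--     for i in range(1, len(l)):
--       if (b == l[i]):
--         c += 1
--         continue
--     if (c == len(l)):
--       return True
--
--   #5
--   if (len_str >= 10 and len_str%5==0):
--     parts = len_str//5
--     l = []
--     step = 5
--     start = 0
--     ende = start + step
--     for i in range(0, parts):
--       l.append(nr_str[start:ende])
--       start += step
--       ende += step
--
--     b = l[0]
--     c = 1
--     for i in range(1, len(l)):
--       if (b == l[i]):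
--         c += 1
--         continue
--     if (c == len(l)):
--       return True
-- ===== SOURCE B (Python) =====
-- def isInvalid2(nr):
--   nr_str = str(nr)
--   if nr_str in (nr_str + nr_str)[1:-1]:
--     return True
-- ===== Notes on version B (the rewrite author's own statement) =====
-- stated objective: alternative
-- what changed: A's five duplicated branches that each build a list of fixed-size blocks and count matching blocks are replaced by the classic rotation trick: the string is a repetition of a smaller block iff it occurs inside (s+s)[1:-1], a single substring test with no explicit loop over period lengths (equivalent because str(nr) is so short on the domain that any proper period has one of the five lengths A tries).
import Mathlib
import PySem

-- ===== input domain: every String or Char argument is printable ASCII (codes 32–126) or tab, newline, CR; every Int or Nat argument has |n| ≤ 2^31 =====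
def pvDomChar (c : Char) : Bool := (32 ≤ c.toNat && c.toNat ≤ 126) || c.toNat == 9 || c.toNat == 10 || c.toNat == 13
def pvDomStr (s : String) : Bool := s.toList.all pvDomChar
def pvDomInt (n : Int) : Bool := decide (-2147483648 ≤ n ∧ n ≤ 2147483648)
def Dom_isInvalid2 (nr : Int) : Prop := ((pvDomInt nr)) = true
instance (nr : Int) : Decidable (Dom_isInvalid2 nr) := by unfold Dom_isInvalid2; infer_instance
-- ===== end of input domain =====

-- B replaces A's five duplicated block-list-and-count branches by the classic rotation
-- trick: one substring test 's in (s+s)[1:-1]' with no period loop (objective: alternative;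
-- equivalent on the domain because str(nr) has at most 11 characters there).

-- ===== PORT A =====
-- block #1 of A: b = nr_str[0]; count the i in range(1, len) with nr_str[i] == b; test c == len
def pvBlock1 (cs : List Char) (len : Int) : Bool :=
  let b := PySem.List.pyGetD cs 0 ' '
  let c : Int := (PySem.List.pyRange 1 len 1).foldl
    (fun c i => if b == PySem.List.pyGetD cs i ' ' then c + 1 else c) 1
  c == len

-- blocks #2–#5 of A (identical code, step = k): build the parts list by the
-- start/ende loop, then count the parts equal to l[0] and test c == len(l)
def pvBlock (cs : List Char) (len k : Int) : Bool :=
  let parts := PySem.Int.floordiv len k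
  let st := (PySem.List.pyRange 0 parts 1).foldl
    (fun (st : List (List Char) × Int × Int) (_ : Int) =>
      (st.1 ++ [PySem.List.slice cs (some st.2.1) (some st.2.2)], st.2.1 + k, st.2.2 + k))
    ([], 0, k)
  let l := st.1
  let b := PySem.List.pyGetD l 0 []
  let c : Int := (PySem.List.pyRange 1 (l.length : Int) 1).foldl
    (fun c i => if b == PySem.List.pyGetD l i [] then c + 1 else c) 1
  c == (l.length : Int)

def isInvalid2 (nr : Int) : Option Bool :=
  let s := PySem.Int.toChars nr
  let len : Int := (s.length : Int)
  if decide (1 < len) && pvBlock1 s len then some true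
  else if (decide (4 ≤ len) && (PySem.Int.mod len 2 == 0)) && pvBlock s len 2 then some true
  else if (decide (6 ≤ len) && (PySem.Int.mod len 3 == 0)) && pvBlock s len 3 then some true
  else if (decide (8 ≤ len) && (PySem.Int.mod len 4 == 0)) && pvBlock s len 4 then some true
  else if (decide (10 ≤ len) && (PySem.Int.mod len 5 == 0)) && pvBlock s len 5 then some true
  else none

-- ===== PORT B =====
-- if nr_str in (nr_str + nr_str)[1:-1]: return True
def isInvalid2_alt (nr : Int) : Option Bool :=
  let s := PySem.Int.toChars nr
  if PySem.Chars.isIn s (PySem.List.slice (s ++ s) (some 1) (some (-1))) then some true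
  else none

-- ===== PRECONDITION & SPEC =====
def Spec_isInvalid2 (nr : Int) (out : Option Bool) : Prop := out = isInvalid2_alt nr
instance (nr : Int) (out : Option Bool) : Decidable (Spec_isInvalid2 nr out) := by unfold Spec_isInvalid2; infer_instance

-- ===== CLAIM (what is proved, stated in full; the proofs are below) =====
def Claim_equal_isInvalid2 : Prop := ∀ (nr : Int), Dom_isInvalid2 nr → Spec_isInvalid2 nr (isInvalid2 nr)

-- ===== LEMMAS AND PROOFS =====

-- proof-side characterisation of each of A's blocks: the k-prefix repeated len//k times is cs
def pvPeriodic (cs : List Char) (len k : Int) : Bool :=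
  (List.replicate (PySem.Int.floordiv len k).toNat (PySem.List.slice cs none (some k))).flatten == cs

-- the five-way disjunction A's branch chain computes (proof-side)
def pvAnyForm (cs : List Char) : Bool :=
  ([1, 2, 3, 4, 5] : List Int).any (fun k =>
    PySem.Int.mod (cs.length : Int) k == 0 && decide (2 * k ≤ (cs.length : Int)) &&
      pvPeriodic cs (cs.length : Int) k)

-- "cs is the k-prefix repeated", in Nat terms
def NatPer (cs : List Char) (k : Nat) : Prop :=
  k ∣ cs.length ∧ 2 * k ≤ cs.length ∧
    (List.replicate (cs.length / k) (cs.take k)).flatten = cs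

-- a string of length m*k is the k-prefix p repeated m times iff every k-chunk equals p
lemma rep_iff (k : Nat) (p : List Char) (hp : p.length = k) :
    ∀ (m : Nat) (cs : List Char), cs.length = m * k →
    ((List.replicate m p).flatten = cs ↔ ∀ i < m, (cs.drop (i * k)).take k = p) := by
  intro m
  induction m with
  | zero =>
    intro cs h
    simp only [Nat.zero_mul] at h
    have hnil : cs = [] := List.length_eq_zero_iff.mp h
    subst hnil
    simp
  | succ m ih =>
    intro cs h
    have hsz : cs.length = m * k + k := by rw [h]; ring
    rw [List.replicate_succ, List.flatten_cons]
    have hlen2 : (cs.drop k).length = m * k := by simp [hsz]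
    constructor
    · intro hcat
      have htake : cs.take k = p := by rw [← hcat, ← hp, List.take_left]
      have hdrop : (List.replicate m p).flatten = cs.drop k := by
        rw [← hcat, ← hp, List.drop_left]
      intro i hi
      cases i with
      | zero => simpa using htake
      | succ j =>
        have hj : j < m := by omega
        have hres := ((ih (cs.drop k) hlen2).mp hdrop) j hj
        rw [List.drop_drop] at hres
        rw [show (j + 1) * k = k + j * k by ring]
        exact hres
    · intro hall
      have htake : cs.take k = p := by simpa using hall 0 (by omega)
      have hrest : (List.replicate m p).flatten = cs.drop k := by
        apply (ih (cs.drop k) hlen2).mpr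
        intro j hj
        have hres := hall (j + 1) (by omega)
        rw [show (j + 1) * k = k + j * k by ring] at hres
        rw [List.drop_drop]
        exact hres
      rw [hrest, ← htake, List.take_append_drop]

lemma build_inv (cs : List Char) (k : Int) (m : Nat) :
    (PySem.List.pyRange 0 (m : Int) 1).foldl
      (fun (st : List (List Char) × Int × Int) (_ : Int) =>
        (st.1 ++ [PySem.List.slice cs (some st.2.1) (some st.2.2)], st.2.1 + k, st.2.2 + k))
      ([], 0, k)
    = ((List.range m).map (fun (i : Nat) => PySem.List.slice cs (some ((i : Int) * k)) (some ((i : Int) * k + k))),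
       (m : Int) * k, (m : Int) * k + k) := by
  induction m with
  | zero => simp
  | succ m ih =>
    rw [show ((m + 1 : Nat) : Int) = (m : Int) + 1 by push_cast; ring]
    rw [PySem.List.pyRange_one_succ_right (Int.natCast_nonneg m)]
    rw [List.foldl_append, ih]
    simp [List.range_succ]
    ring_nf

lemma block_eq (cs : List Char) (k : Nat) (hk : 0 < k) (h2 : 2 * k ≤ cs.length)
    (hd : k ∣ cs.length) :
    pvBlock cs (cs.length : Int) (k : Int) = pvPeriodic cs (cs.length : Int) (k : Int) := by
  obtain ⟨m, hm⟩ := hd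
  have hm2 : 2 ≤ m := by
    rcases Nat.lt_or_ge m 2 with h | h
    · exfalso
      have : k * m ≤ k * 1 := Nat.mul_le_mul_left k (by omega)
      omega
    · exact h
  obtain ⟨m1, rfl⟩ : ∃ m1, m = m1 + 2 := ⟨m - 2, by omega⟩
  have hdivN : cs.length / k = m1 + 2 := by
    rw [hm, Nat.mul_div_cancel_left _ hk]
  have hdiv : PySem.Int.floordiv ((cs.length : Nat) : Int) ((k : Nat) : Int) = ((m1 + 2 : Nat) : Int) := by
    rw [PySem.Int.floordiv_natCast, hdivN]
  have hchunk : ∀ i : Nat, PySem.List.slice cs (some ((i : Int) * (k : Int))) (some ((i : Int) * (k : Int) + (k : Int))) = (cs.drop (i * k)).take k := by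
    intro i
    rw [show ((i : Int) * (k : Int)) = ((i * k : Nat) : Int) by push_cast; ring]
    exact PySem.List.slice_natCast_add cs (i * k) k
  simp only [pvBlock, pvPeriodic]
  rw [hdiv, build_inv]
  simp only [hchunk]
  set L := List.map (fun i => List.take k (List.drop (i * k) cs)) (List.range (m1 + 2)) with hLdef
  have hb : PySem.List.pyGetD L 0 [] = cs.take k := by
    rw [PySem.List.pyGetD_ofNat', hLdef, List.range_succ_eq_map]
    simp
  rw [hb]
  rw [PySem.List.foldl_pyRange_pyGetD' L ([] : List Char)
        (fun c x => if (cs.take k == x) = true then c + 1 else c) 1 (by norm_num)]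
  rw [PySem.List.foldl_if_add_one (fun x => cs.take k == x)]
  have hLlen : L.length = m1 + 2 := by simp [hLdef]
  have hTlen : (L.drop (1 : Int).toNat).length = m1 + 1 := by simp [hLlen]
  rw [Bool.eq_iff_iff]
  simp only [beq_iff_eq]
  rw [hLlen, PySem.List.slice_to_natCast, Int.toNat_natCast]
  have hkle : k ≤ cs.length := by omega
  have hrep := rep_iff k (cs.take k) (by rw [List.length_take]; omega) (m1 + 2) cs (by rw [hm]; ring)
  have hmem : (∀ a ∈ L.drop (1 : Int).toNat, (cs.take k == a) = true) ↔
      (∀ j, j < m1 + 1 → cs.take k = List.take k (List.drop ((j + 1) * k) cs)) := by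
    rw [hLdef, List.range_succ_eq_map]
    simp [List.mem_map, List.mem_range, Function.comp, Nat.succ_eq_add_one]
  constructor
  · intro hcount
    rw [hrep]
    have hc : (L.drop (1 : Int).toNat).countP (fun x => cs.take k == x) = m1 + 1 := by omega
    have hall := (List.countP_eq_length (p := fun x => cs.take k == x)).mp (by rw [hc, hTlen])
    have hall2 := hmem.mp hall
    intro i hi
    cases i with
    | zero => simp
    | succ j => exact (hall2 j (by omega)).symm
  · intro hflat
    have hall := hrep.mp hflat
    have hall2 : ∀ a ∈ L.drop (1 : Int).toNat, (cs.take k == a) = true := by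
      rw [hmem]
      intro j hj
      exact (hall (j + 1) (by omega)).symm
    have hcl := (List.countP_eq_length (p := fun x => cs.take k == x)).mpr hall2
    rw [hTlen] at hcl
    omega

lemma block1_eq (cs : List Char) (h : 2 ≤ cs.length) :
    pvBlock1 cs (cs.length : Int) = pvPeriodic cs (cs.length : Int) 1 := by
  obtain ⟨c0, t, rfl⟩ : ∃ c0 t, cs = c0 :: t := by
    cases cs with
    | nil => simp at h
    | cons a l => exact ⟨a, l, rfl⟩
  simp only [pvBlock1, pvPeriodic]
  have hfd : PySem.Int.floordiv (((c0 :: t).length : Nat) : Int) (1 : Int) = (((c0 :: t).length : Nat) : Int) := by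
    rw [show ((1 : Int)) = ((1 : Nat) : Int) from rfl, PySem.Int.floordiv_natCast]
    simp
  have hsl : PySem.List.slice (c0 :: t) none (some (1 : Int)) = [c0] := by
    have h1 := PySem.List.slice_to_natCast (c0 :: t) 1
    simpa using h1
  have hb : PySem.List.pyGetD (c0 :: t) 0 ' ' = c0 := by
    rw [PySem.List.pyGetD_ofNat']
    simp
  rw [hfd, hsl, hb]
  rw [PySem.List.foldl_pyRange_pyGetD' (c0 :: t) ' '
        (fun c x => if (c0 == x) = true then c + 1 else c) 1 (by norm_num)]
  rw [PySem.List.foldl_if_add_one (fun x => c0 == x)]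
  rw [Bool.eq_iff_iff]
  simp only [beq_iff_eq, Int.toNat_one, Int.toNat_natCast, List.flatten_replicate_singleton,
    List.length_cons, List.drop_succ_cons, List.drop_zero]
  constructor
  · intro hcount
    have hc : t.countP (fun x => c0 == x) = t.length := by omega
    have hall := (List.countP_eq_length (p := fun x => c0 == x)).mp hc
    rw [List.replicate_succ]
    congr 1
    exact (List.eq_replicate_iff.mpr ⟨rfl, fun b hb => (beq_iff_eq.mp (hall b hb)).symm⟩).symm
  · intro hflat
    rw [List.replicate_succ] at hflat
    simp only [List.cons.injEq, true_and] at hflat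
    have hall : ∀ x ∈ t, (fun x => c0 == x) x = true := by
      intro x hx
      exact beq_iff_eq.mpr ((List.eq_replicate_iff.mp hflat.symm).2 x hx).symm
    have hcl := (List.countP_eq_length (p := fun x => c0 == x)).mpr hall
    omega

lemma chain_if (b1 b2 b3 b4 b5 : Bool) :
    (if b1 then some true else if b2 then some true else if b3 then some true
     else if b4 then some true else if b5 then some true else none)
    = (if b1 || (b2 || (b3 || (b4 || b5))) then some true else (none : Option Bool)) := by
  cases b1 <;> cases b2 <;> cases b3 <;> cases b4 <;> cases b5 <;> simp

-- A's branch chain computes exactly pvAnyForm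
lemma a_eq_any (nr : Int) :
    isInvalid2 nr = (if pvAnyForm (PySem.Int.toChars nr) then some true else none) := by
  simp only [isInvalid2, pvAnyForm]
  generalize PySem.Int.toChars nr = cs
  simp only [List.any_cons, List.any_nil, Bool.or_false]
  have hm1 : PySem.Int.mod (cs.length : Int) 1 = 0 :=
    (PySem.Int.mod_eq_zero_iff_dvd _ _).mpr (one_dvd _)
  have g1 : (decide ((1 : Int) < ↑cs.length) && pvBlock1 cs ↑cs.length)
      = (PySem.Int.mod ↑cs.length 1 == 0 && decide ((2 : Int) * 1 ≤ ↑cs.length) && pvPeriodic cs ↑cs.length 1) := by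
    by_cases h : (1 : Int) < ↑cs.length
    · have ha : (decide ((1 : Int) < (cs.length : Int))) = true := decide_eq_true h
      have hb' : (decide ((2 : Int) * 1 ≤ (cs.length : Int))) = true := decide_eq_true (by omega)
      have hmb : (PySem.Int.mod (cs.length : Int) 1 == 0) = true := by rw [hm1]; rfl
      rw [ha, hb', hmb, block1_eq cs (by omega)]
      simp
    · have ha : (decide ((1 : Int) < (cs.length : Int))) = false := decide_eq_false h
      have hb' : (decide ((2 : Int) * 1 ≤ (cs.length : Int))) = false := decide_eq_false (by omega)
      rw [ha, hb']
      simp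
  have g2 : ((decide ((4 : Int) ≤ ↑cs.length) && (PySem.Int.mod ↑cs.length 2 == 0)) && pvBlock cs ↑cs.length 2)
      = (PySem.Int.mod ↑cs.length 2 == 0 && decide ((2 : Int) * 2 ≤ ↑cs.length) && pvPeriodic cs ↑cs.length 2) := by
    by_cases hL : (4 : Int) ≤ ↑cs.length
    · by_cases hm : PySem.Int.mod ↑cs.length 2 = 0
      · have hdvd : (2 : Nat) ∣ cs.length := by
          have hh := (PySem.Int.mod_eq_zero_iff_dvd ((cs.length : Int)) 2).mp hm
          exact_mod_cast hh
        have e : pvBlock cs ↑cs.length 2 = pvPeriodic cs ↑cs.length 2 := by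
          simpa using block_eq cs 2 (by norm_num) (by omega) hdvd
        have ha : (decide ((4 : Int) ≤ (cs.length : Int))) = true := decide_eq_true hL
        have hb' : (decide ((2 : Int) * 2 ≤ (cs.length : Int))) = true := decide_eq_true (by omega)
        have hmb : (PySem.Int.mod (cs.length : Int) 2 == 0) = true := by simpa using hm
        rw [ha, hb', hmb, e]
      · have hmb : (PySem.Int.mod (cs.length : Int) 2 == 0) = false := by simpa using hm
        rw [hmb]
        simp
    · have ha : (decide ((4 : Int) ≤ (cs.length : Int))) = false := decide_eq_false hL
      have hb' : (decide ((2 : Int) * 2 ≤ (cs.length : Int))) = false := decide_eq_false (by omega)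
      rw [ha, hb']
      simp
  have g3 : ((decide ((6 : Int) ≤ ↑cs.length) && (PySem.Int.mod ↑cs.length 3 == 0)) && pvBlock cs ↑cs.length 3)
      = (PySem.Int.mod ↑cs.length 3 == 0 && decide ((2 : Int) * 3 ≤ ↑cs.length) && pvPeriodic cs ↑cs.length 3) := by
    by_cases hL : (6 : Int) ≤ ↑cs.length
    · by_cases hm : PySem.Int.mod ↑cs.length 3 = 0
      · have hdvd : (3 : Nat) ∣ cs.length := by
          have hh := (PySem.Int.mod_eq_zero_iff_dvd ((cs.length : Int)) 3).mp hm
          exact_mod_cast hh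
        have e : pvBlock cs ↑cs.length 3 = pvPeriodic cs ↑cs.length 3 := by
          simpa using block_eq cs 3 (by norm_num) (by omega) hdvd
        have ha : (decide ((6 : Int) ≤ (cs.length : Int))) = true := decide_eq_true hL
        have hb' : (decide ((2 : Int) * 3 ≤ (cs.length : Int))) = true := decide_eq_true (by omega)
        have hmb : (PySem.Int.mod (cs.length : Int) 3 == 0) = true := by simpa using hm
        rw [ha, hb', hmb, e]
      · have hmb : (PySem.Int.mod (cs.length : Int) 3 == 0) = false := by simpa using hm
        rw [hmb]
        simp
    · have ha : (decide ((6 : Int) ≤ (cs.length : Int))) = false := decide_eq_false hL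
      have hb' : (decide ((2 : Int) * 3 ≤ (cs.length : Int))) = false := decide_eq_false (by omega)
      rw [ha, hb']
      simp
  have g4 : ((decide ((8 : Int) ≤ ↑cs.length) && (PySem.Int.mod ↑cs.length 4 == 0)) && pvBlock cs ↑cs.length 4)
      = (PySem.Int.mod ↑cs.length 4 == 0 && decide ((2 : Int) * 4 ≤ ↑cs.length) && pvPeriodic cs ↑cs.length 4) := by
    by_cases hL : (8 : Int) ≤ ↑cs.length
    · by_cases hm : PySem.Int.mod ↑cs.length 4 = 0
      · have hdvd : (4 : Nat) ∣ cs.length := by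
          have hh := (PySem.Int.mod_eq_zero_iff_dvd ((cs.length : Int)) 4).mp hm
          exact_mod_cast hh
        have e : pvBlock cs ↑cs.length 4 = pvPeriodic cs ↑cs.length 4 := by
          simpa using block_eq cs 4 (by norm_num) (by omega) hdvd
        have ha : (decide ((8 : Int) ≤ (cs.length : Int))) = true := decide_eq_true hL
        have hb' : (decide ((2 : Int) * 4 ≤ (cs.length : Int))) = true := decide_eq_true (by omega)
        have hmb : (PySem.Int.mod (cs.length : Int) 4 == 0) = true := by simpa using hm
        rw [ha, hb', hmb, e]
      · have hmb : (PySem.Int.mod (cs.length : Int) 4 == 0) = false := by simpa using hm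
        rw [hmb]
        simp
    · have ha : (decide ((8 : Int) ≤ (cs.length : Int))) = false := decide_eq_false hL
      have hb' : (decide ((2 : Int) * 4 ≤ (cs.length : Int))) = false := decide_eq_false (by omega)
      rw [ha, hb']
      simp
  have g5 : ((decide ((10 : Int) ≤ ↑cs.length) && (PySem.Int.mod ↑cs.length 5 == 0)) && pvBlock cs ↑cs.length 5)
      = (PySem.Int.mod ↑cs.length 5 == 0 && decide ((2 : Int) * 5 ≤ ↑cs.length) && pvPeriodic cs ↑cs.length 5) := by
    by_cases hL : (10 : Int) ≤ ↑cs.length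
    · by_cases hm : PySem.Int.mod ↑cs.length 5 = 0
      · have hdvd : (5 : Nat) ∣ cs.length := by
          have hh := (PySem.Int.mod_eq_zero_iff_dvd ((cs.length : Int)) 5).mp hm
          exact_mod_cast hh
        have e : pvBlock cs ↑cs.length 5 = pvPeriodic cs ↑cs.length 5 := by
          simpa using block_eq cs 5 (by norm_num) (by omega) hdvd
        have ha : (decide ((10 : Int) ≤ (cs.length : Int))) = true := decide_eq_true hL
        have hb' : (decide ((2 : Int) * 5 ≤ (cs.length : Int))) = true := decide_eq_true (by omega)
        have hmb : (PySem.Int.mod (cs.length : Int) 5 == 0) = true := by simpa using hm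
        rw [ha, hb', hmb, e]
      · have hmb : (PySem.Int.mod (cs.length : Int) 5 == 0) = false := by simpa using hm
        rw [hmb]
        simp
    · have ha : (decide ((10 : Int) ≤ (cs.length : Int))) = false := decide_eq_false hL
      have hb' : (decide ((2 : Int) * 5 ≤ (cs.length : Int))) = false := decide_eq_false (by omega)
      rw [ha, hb']
      simp
  rw [g1, g2, g3, g4, g5]
  exact chain_if _ _ _ _ _

-- pvAnyForm is the existence of a period length 1..5 (Nat form)
lemma anyForm_iff (cs : List Char) :
    pvAnyForm cs = true ↔ ∃ k : Nat, 1 ≤ k ∧ k ≤ 5 ∧ NatPer cs k := by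
  have hper : ∀ k : Nat, 0 < k →
      ((PySem.Int.mod (cs.length : Int) (k : Int) == 0
          && decide (2 * (k : Int) ≤ (cs.length : Int))
          && pvPeriodic cs (cs.length : Int) (k : Int)) = true ↔ NatPer cs k) := by
    intro k hk
    simp only [pvPeriodic, PySem.Int.floordiv_natCast, PySem.List.slice_to_natCast,
      Int.toNat_natCast, Bool.and_eq_true, beq_iff_eq, decide_eq_true_eq,
      PySem.Int.mod_eq_zero_iff_dvd, Int.natCast_dvd_natCast, NatPer]
    constructor
    · rintro ⟨⟨h1, h2⟩, h3⟩
      exact ⟨h1, by exact_mod_cast h2, h3⟩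
    · rintro ⟨h1, h2, h3⟩
      exact ⟨⟨h1, by exact_mod_cast h2⟩, h3⟩
  constructor
  · intro h
    simp only [pvAnyForm, List.any_eq_true, List.mem_cons, List.not_mem_nil, or_false] at h
    obtain ⟨k, hk, hb⟩ := h
    rcases hk with rfl | rfl | rfl | rfl | rfl
    · exact ⟨1, by norm_num, by norm_num, (hper 1 (by norm_num)).mp (by exact_mod_cast hb)⟩
    · exact ⟨2, by norm_num, by norm_num, (hper 2 (by norm_num)).mp (by exact_mod_cast hb)⟩
    · exact ⟨3, by norm_num, by norm_num, (hper 3 (by norm_num)).mp (by exact_mod_cast hb)⟩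
    · exact ⟨4, by norm_num, by norm_num, (hper 4 (by norm_num)).mp (by exact_mod_cast hb)⟩
    · exact ⟨5, by norm_num, by norm_num, (hper 5 (by norm_num)).mp (by exact_mod_cast hb)⟩
  · rintro ⟨k, hk1, hk5, hp⟩
    simp only [pvAnyForm, List.any_eq_true, List.mem_cons, List.not_mem_nil, or_false]
    refine ⟨(k : Int), ?_, ?_⟩
    · interval_cases k <;> simp
    · exact (hper k (by omega)).mpr hp

-- getD-level shift invariance: reading cs at (j + d) % n is reading cs at j
def ShInv (cs : List Char) (d : Nat) : Prop :=
  ∀ j, j < cs.length → cs.getD ((j + d) % cs.length) ' ' = cs.getD j ' '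

lemma shinv_mod (cs : List Char) (d : Nat) :
    ShInv cs d ↔ ShInv cs (d % cs.length) := by
  unfold ShInv
  constructor <;> intro h j hj
  · rw [Nat.add_mod, Nat.mod_mod_of_dvd d dvd_rfl, ← Nat.add_mod]
    exact h j hj
  · rw [Nat.add_mod, ← Nat.mod_mod_of_dvd d dvd_rfl, ← Nat.add_mod]
    exact h j hj

lemma shinv_add (cs : List Char) (a b : Nat) (h0 : 0 < cs.length)
    (ha : ShInv cs a) (hb : ShInv cs b) : ShInv cs (a + b) := by
  intro j hj
  have h1 := hb ((j + a) % cs.length) (Nat.mod_lt _ h0)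
  rw [Nat.mod_add_mod] at h1
  rw [show j + (a + b) = j + a + b by ring]
  rw [h1]
  exact ha j hj

lemma shinv_mul (cs : List Char) (a : Nat) (h0 : 0 < cs.length)
    (ha : ShInv cs a) : ∀ t : Nat, ShInv cs (t * a) := by
  intro t
  induction t with
  | zero =>
    intro j hj
    simp [Nat.mod_eq_of_lt hj]
  | succ t ih =>
    have := shinv_add cs (t * a) a h0 ih ha
    rw [show (t + 1) * a = t * a + a by ring]
    exact this

-- shift invariance descends to the gcd of the shift and the length (Bézout)
lemma shinv_gcd (cs : List Char) (i : Nat) (h0 : 0 < cs.length)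
    (hi : ShInv cs i) : ShInv cs (Nat.gcd i cs.length) := by
  set n := cs.length with hn
  have hbez : (Nat.gcd i n : Int) = i * Int.gcdA i n + n * Int.gcdB i n := by
    have := Int.gcd_eq_gcd_ab (i : Int) (n : Int)
    simpa [Int.gcd_natCast_natCast] using this
  set x : Int := Int.gcdA i n with hx
  have hnpos : (0 : Int) < n := by exact_mod_cast h0
  set t : Nat := (x % n).toNat with ht
  have htx : (t : Int) = x % n := by
    rw [ht, Int.toNat_of_nonneg (Int.emod_nonneg x (by omega))]
  -- (t * i) % n = gcd i n % n  over ℤ, hence over ℕ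
  have hmodZ : ((t * i : Nat) : Int) % n = ((Nat.gcd i n : Nat) : Int) % n := by
    push_cast
    rw [htx]
    have h1 : (x % n) * i ≡ x * i [ZMOD n] := by
      exact Int.ModEq.mul_right i (Int.emod_emod_of_dvd x dvd_rfl)
    have h2 : x * i ≡ (Nat.gcd i n : Int) [ZMOD n] := by
      have : (Nat.gcd i n : Int) - x * i = n * Int.gcdB i n := by rw [hbez]; ring
      have hd : (n : Int) ∣ (Nat.gcd i n : Int) - x * i := ⟨Int.gcdB i n, this⟩
      exact Int.modEq_iff_dvd.mpr hd
    exact h1.trans h2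
  have hmodN : (t * i) % n = Nat.gcd i n % n := by exact_mod_cast hmodZ
  have h1 : ShInv cs (t * i) := shinv_mul cs i h0 hi t
  have h2 : ShInv cs ((t * i) % n) := (shinv_mod cs (t * i)).mp h1
  rw [hmodN] at h2
  exact (shinv_mod cs (Nat.gcd i n)).mpr h2

-- a g-shift-invariant string with g ∣ length is determined by its residues mod g
lemma shinv_periodic (cs : List Char) (g : Nat) (hg : 0 < g)
    (hinv : ShInv cs g) : ∀ j, j < cs.length → cs.getD j ' ' = cs.getD (j % g) ' ' := by
  intro j
  induction j using Nat.strong_induction_on with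
  | _ j ih =>
    intro hj
    by_cases hjg : j < g
    · rw [Nat.mod_eq_of_lt hjg]
    · have hjg' : g ≤ j := by omega
      have h1 := hinv (j - g) (by omega)
      rw [show j - g + g = j by omega, Nat.mod_eq_of_lt hj] at h1
      rw [h1, ih (j - g) (by omega) (by omega)]
      congr 1
      conv_rhs => rw [show j = (j - g) + g by omega]
      rw [Nat.add_mod_right]

-- a g-shift-invariant string (g a proper divisor) is its g-prefix repeated
lemma shinv_natPer (cs : List Char) (g : Nat) (hg : 0 < g) (hdvd : g ∣ cs.length)
    (h2g : 2 * g ≤ cs.length) (hinv : ShInv cs g) : NatPer cs g := by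
  obtain ⟨m, hm⟩ := hdvd
  have hmg : cs.length = m * g := by rw [hm]; ring
  have hdivm : cs.length / g = m := by rw [hm, Nat.mul_div_cancel_left _ hg]
  have hp : (cs.take g).length = g := by
    rw [List.length_take]; omega
  refine ⟨⟨m, hm⟩, h2g, ?_⟩
  rw [hdivm]
  rw [rep_iff g (cs.take g) hp m cs hmg]
  intro i hi
  have hper := shinv_periodic cs g hg hinv
  have hI : i * g + g ≤ cs.length := by
    have h := Nat.mul_le_mul_right g (show i + 1 ≤ m by omega)
    rw [hmg]
    calc i * g + g = (i + 1) * g := by ring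
      _ ≤ m * g := h
  apply List.ext_getElem
  · rw [List.length_take, List.length_drop, List.length_take]
    omega
  · intro r h1 h2
    have hr : r < g := by
      rw [List.length_take, List.length_drop] at h1
      omega
    have hig : i * g + r < cs.length := by omega
    rw [List.getElem_take, List.getElem_drop, List.getElem_take]
    have e1 : cs[i * g + r] = cs.getD (i * g + r) ' ' := (List.getD_eq_getElem cs ' ' hig).symm
    have e2 : cs[r]'(by omega) = cs.getD r ' ' := (List.getD_eq_getElem cs ' ' (by omega)).symm
    rw [e1, e2, hper (i * g + r) hig, Nat.mul_comm i g, Nat.mul_add_mod, Nat.mod_eq_of_lt hr,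
      hper r (by omega), Nat.mod_eq_of_lt hr]

-- the middle slice (s+s)[1:-1], computed
lemma slice_mid (cs : List Char) (h0 : 0 < cs.length) :
    PySem.List.slice (cs ++ cs) (some 1) (some (-1))
      = ((cs ++ cs).drop 1).take (2 * cs.length - 2) := by
  simp [PySem.List.slice]
  rw [show min 1 (cs.length + cs.length) = 1 by omega, List.drop_one]
  congr 1
  omega

-- reading s+s at x < 2n is reading s at x mod n
lemma double_getD (cs : List Char) (x : Nat) (hx : x < 2 * cs.length) :
    (cs ++ cs).getD x ' ' = cs.getD (x % cs.length) ' ' := by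
  rcases Nat.lt_or_ge x cs.length with h | h
  · rw [Nat.mod_eq_of_lt h, List.getD_eq_getElem?_getD, List.getD_eq_getElem?_getD,
      List.getElem?_append_left h]
  · have hx' : x % cs.length = x - cs.length := by
      rw [Nat.mod_eq_sub_mod h, Nat.mod_eq_of_lt (by omega)]
    rw [hx', List.getD_eq_getElem?_getD, List.getD_eq_getElem?_getD,
      List.getElem?_append_right h]

-- FORWARD: a repeated string occurs inside (s+s)[1:-1]
lemma natPer_infix (cs : List Char) (k : Nat) (hk : 1 ≤ k) (hp : NatPer cs k) :
    cs <:+: ((cs ++ cs).drop 1).take (2 * cs.length - 2) := by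
  obtain ⟨⟨m, hm⟩, h2k, hflat⟩ := hp
  have hm2 : 2 ≤ m := by
    rcases Nat.lt_or_ge m 2 with hc | hc
    · exfalso
      have h1 : k * m ≤ k * 1 := Nat.mul_le_mul_left k (by omega)
      rw [Nat.mul_one] at h1
      omega
    · exact hc
  have hdiv : cs.length / k = m := by rw [hm, Nat.mul_div_cancel_left _ (by omega)]
  rw [hdiv] at hflat
  have hkn : k + 1 ≤ cs.length := by omega
  have hplen0 : (cs.take k).length = k := by rw [List.length_take]; omega
  obtain ⟨p, hplen, hflat⟩ : ∃ p : List Char, p.length = k ∧ (List.replicate m p).flatten = cs :=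
    ⟨cs.take k, hplen0, hflat⟩
  have hcs : cs = p ++ (List.replicate (m - 1) p).flatten := by
    conv_lhs => rw [← hflat, show m = 1 + (m - 1) by omega, List.replicate_add,
      List.flatten_append]
    simp
  have hcomm : (List.replicate (m - 1) p).flatten ++ cs
      = cs ++ (List.replicate (m - 1) p).flatten := by
    conv_lhs => rw [← hflat]
    conv_rhs => rw [← hflat]
    rw [← List.flatten_append, ← List.replicate_add, ← List.flatten_append,
      ← List.replicate_add, show m - 1 + m = m + (m - 1) by omega]
  have hkey : cs ++ cs = p ++ (cs ++ (List.replicate (m - 1) p).flatten) := by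
    calc cs ++ cs = (p ++ (List.replicate (m - 1) p).flatten) ++ cs := by rw [← hcs]
      _ = p ++ ((List.replicate (m - 1) p).flatten ++ cs) := by rw [List.append_assoc]
      _ = p ++ (cs ++ (List.replicate (m - 1) p).flatten) := by rw [hcomm]
  obtain ⟨c, p', hpc⟩ : ∃ c p', p = c :: p' := by
    cases hq : p with
    | nil => rw [hq] at hplen; simp at hplen; omega
    | cons a l => exact ⟨a, l, rfl⟩
  subst hpc
  have hp'len : p'.length = k - 1 := by
    simp at hplen
    omega
  rw [hkey, List.cons_append, List.drop_one, List.tail_cons]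
  rw [show p' ++ (cs ++ (List.replicate (m - 1) (c :: p')).flatten)
      = (p' ++ cs) ++ (List.replicate (m - 1) (c :: p')).flatten by
    rw [List.append_assoc]]
  rw [List.take_append]
  have hlen' : (p' ++ cs).length ≤ 2 * cs.length - 2 := by
    rw [List.length_append, hp'len]
    omega
  rw [List.take_of_length_le hlen']
  exact ⟨p', _, rfl⟩

-- BACKWARD: an occurrence inside (s+s)[1:-1] yields a period in 1..5 dividing the length
lemma infix_natPer (cs : List Char) (h0 : 0 < cs.length) (h11 : cs.length ≤ 11)
    (hin : cs <:+: ((cs ++ cs).drop 1).take (2 * cs.length - 2)) :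
    ∃ k : Nat, 1 ≤ k ∧ k ≤ 5 ∧ NatPer cs k := by
  obtain ⟨t, u, hmid⟩ := hin
  have hmidlen : (((cs ++ cs).drop 1).take (2 * cs.length - 2)).length
      = 2 * cs.length - 2 := by
    rw [List.length_take, List.length_drop, List.length_append]
    omega
  have hlen : t.length + cs.length + u.length = 2 * cs.length - 2 := by
    have h := congrArg List.length hmid
    rw [hmidlen] at h
    simp only [List.length_append] at h
    omega
  have hn2 : 2 ≤ cs.length := by omega
  have hiub : t.length + 1 ≤ cs.length - 1 := by omega
  have occ : ∀ j, j < cs.length →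
      cs.getD ((j + (t.length + 1)) % cs.length) ' ' = cs.getD j ' ' := by
    intro j hj
    have hxj : t.length + j < 2 * cs.length - 2 := by omega
    have e1 : (((cs ++ cs).drop 1).take (2 * cs.length - 2)).getD (t.length + j) ' '
        = cs.getD j ' ' := by
      rw [← hmid, List.getD_eq_getElem?_getD, List.append_assoc,
        List.getElem?_append_right (by omega), show t.length + j - t.length = j by omega,
        List.getElem?_append_left hj, ← List.getD_eq_getElem?_getD]
    have e2 : (((cs ++ cs).drop 1).take (2 * cs.length - 2)).getD (t.length + j) ' '
        = (cs ++ cs).getD (1 + (t.length + j)) ' ' := by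
      rw [List.getD_eq_getElem?_getD, List.getElem?_take_of_lt hxj, List.getElem?_drop,
        ← List.getD_eq_getElem?_getD]
    have e3 : (cs ++ cs).getD (1 + (t.length + j)) ' '
        = cs.getD ((j + (t.length + 1)) % cs.length) ' ' := by
      rw [double_getD cs _ (by omega), show 1 + (t.length + j) = j + (t.length + 1) by omega]
    rw [← e3, ← e2, e1]
  have hshinv : ShInv cs (t.length + 1) := occ
  have hgdvd : Nat.gcd (t.length + 1) cs.length ∣ cs.length := Nat.gcd_dvd_right _ _
  have hgi : Nat.gcd (t.length + 1) cs.length ∣ t.length + 1 := Nat.gcd_dvd_left _ _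
  have hgpos : 0 < Nat.gcd (t.length + 1) cs.length :=
    Nat.gcd_pos_of_pos_left _ (by omega)
  have hglt : Nat.gcd (t.length + 1) cs.length < cs.length :=
    lt_of_le_of_lt (Nat.le_of_dvd (by omega) hgi) (by omega)
  have h2g : 2 * Nat.gcd (t.length + 1) cs.length ≤ cs.length := by
    obtain ⟨c, hc⟩ := hgdvd
    have hc2 : 2 ≤ c := by
      rcases c with _ | _ | c
      · omega
      · exfalso; rw [Nat.mul_one] at hc; omega
      · omega
    calc 2 * Nat.gcd (t.length + 1) cs.length
        = Nat.gcd (t.length + 1) cs.length * 2 := by ring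
      _ ≤ Nat.gcd (t.length + 1) cs.length * c := Nat.mul_le_mul_left _ hc2
      _ = cs.length := hc.symm
  exact ⟨Nat.gcd (t.length + 1) cs.length, by omega, by omega,
    shinv_natPer cs _ hgpos hgdvd h2g (shinv_gcd cs (t.length + 1) h0 hshinv)⟩

-- str(nr) is nonempty and, for |nr| ≤ 2^31, at most 11 characters long
lemma toDigitsCore_len_ge (b : Nat) :
    ∀ (f n : Nat) (ds : List Char), ds.length ≤ (Nat.toDigitsCore b f n ds).length := by
  intro f
  induction f with
  | zero => intro n ds; simp [Nat.toDigitsCore]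
  | succ f ih =>
    intro n ds
    simp only [Nat.toDigitsCore]
    split
    · simp
    · calc ds.length ≤ (Nat.digitChar (n % b) :: ds).length := by simp
        _ ≤ _ := ih _ _

lemma toChars_len_pos (nr : Int) : 0 < (PySem.Int.toChars nr).length := by
  unfold PySem.Int.toChars
  split
  · simp
  · unfold Nat.toDigits
    have h := toDigitsCore_len_ge 10 (nr.toNat + 1) nr.toNat []
    simp only [Nat.toDigitsCore]
    split
    · simp
    · have := toDigitsCore_len_ge 10 nr.toNat (nr.toNat / 10)
          [Nat.digitChar (nr.toNat % 10)]
      simp at this ⊢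
      omega

lemma toChars_len_le (nr : Int) (h : -2147483648 ≤ nr ∧ nr ≤ 2147483648) :
    (PySem.Int.toChars nr).length ≤ 11 := by
  unfold PySem.Int.toChars
  have hd : ∀ m : Nat, m ≤ 2147483648 → (Nat.toDigits 10 m).length ≤ 10 := by
    intro m hm
    exact Nat.toDigits_length 10 m 10 (by norm_num) (by norm_num; omega)
  split
  · have : nr.natAbs ≤ 2147483648 := by omega
    simp only [List.length_cons]
    have := hd nr.natAbs this
    omega
  · have : nr.toNat ≤ 2147483648 := by omega
    have := hd nr.toNat this
    omega

-- main bridge: on strings of length 1..11, the rotation test equals the 1..5 period test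
lemma any_eq_isin (cs : List Char) (h0 : 0 < cs.length) (h11 : cs.length ≤ 11) :
    pvAnyForm cs = PySem.Chars.isIn cs (PySem.List.slice (cs ++ cs) (some 1) (some (-1))) := by
  rw [Bool.eq_iff_iff, anyForm_iff, PySem.Chars.isIn_iff_infix, slice_mid cs h0]
  constructor
  · rintro ⟨k, hk1, hk5, hp⟩
    exact natPer_infix cs k hk1 hp
  · intro h
    exact infix_natPer cs h0 h11 h

-- ===== VERDICT (by name: the statement is the Claim_ definition above) =====
theorem isInvalid2_spec : Claim_equal_isInvalid2 := by
  intro nr hdom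
  unfold Spec_isInvalid2
  have hdom' : -2147483648 ≤ nr ∧ nr ≤ 2147483648 := by
    have := hdom
    unfold Dom_isInvalid2 pvDomInt at this
    exact of_decide_eq_true this
  rw [a_eq_any nr]
  show _ = isInvalid2_alt nr
  unfold isInvalid2_alt
  rw [any_eq_isin (PySem.Int.toChars nr) (toChars_len_pos nr)
    (toChars_len_le nr hdom')]
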